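-- pv_equiv track=rewrite | github.com/fhujangga18/UTS-Python- | jawaban No9.py | analyze_transactions
-- ===== SOURCE A (Python) =====
-- def analyze_transactions(transactions):
--     """
--     Analyzes a series of transactions to calculate the final balance,
--     identify the day with the largest expense, and find days without transactions.
--
--     Args:
--         transactions: A dictionary where keys are days (strings) and values are transaction amounts (integers).
--
--     Returns:
--         A tuple containing:
--             - The final balance (integer).
--             - The day with the largest expense (string).
--             - A list of days without transactions (list of strings).
--     """
--
--     balance = 0
--     largest_expense_day = None
--     largest_expense = 0
--     no_transaction_days = []
--
--     for day, amount in transactions.items():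
--         balance += amount
--         if amount < largest_expense:
--             largest_expense = amount
--             largest_expense_day = day
--         if amount == 0:
--             no_transaction_days.append(day)
--
--     return balance, largest_expense_day, no_transaction_days
-- ===== SOURCE B (Python) =====
-- def analyze_transactions(transactions):
--     # Sort the items once by amount (Python's sort is stable); then read everything off.
--     items = sorted(transactions.items(), key=lambda kv: kv[1])
--     balance = sum(a for _, a in items)
--     # stability: zero-amount days keep their original (insertion) order
--     no_transaction_days = [d for d, a in items if a == 0]
--     # the head of the stable sort is the FIRST occurrence of the minimum amount
--     largest_expense_day = items[0][0] if items and items[0][1] < 0 else None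
--     return balance, largest_expense_day, no_transaction_days
-- ===== Notes on version B (the rewrite author's own statement) =====
-- stated objective: alternative
-- what changed: Replaces A's single stateful scan (running balance, running minimum with its day, appended zero-days) by a sort-based algorithm: stable-sort the items by amount once, then the balance is the sum of the sorted amounts, the zero days are the zero-amount entries of the sorted list (stability preserves their insertion order), and the largest-expense day is the head of the sorted list when its amount is negative.
import Mathlib
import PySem

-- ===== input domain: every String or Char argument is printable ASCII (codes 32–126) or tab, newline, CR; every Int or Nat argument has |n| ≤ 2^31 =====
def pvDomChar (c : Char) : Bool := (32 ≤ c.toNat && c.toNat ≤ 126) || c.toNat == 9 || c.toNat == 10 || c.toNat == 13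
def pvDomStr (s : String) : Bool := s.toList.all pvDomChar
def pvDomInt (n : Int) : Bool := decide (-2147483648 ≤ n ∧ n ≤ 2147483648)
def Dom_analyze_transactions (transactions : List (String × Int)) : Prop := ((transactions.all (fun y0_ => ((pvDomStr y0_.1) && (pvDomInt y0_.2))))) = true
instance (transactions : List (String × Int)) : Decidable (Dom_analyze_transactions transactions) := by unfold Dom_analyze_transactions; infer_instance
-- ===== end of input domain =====

-- B stable-sorts the items by amount once and reads all three answers off the sorted list,
-- instead of A's single loop over four pieces of running state (objective: alternative algorithm).

-- ===== PORT A =====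
-- one iteration of A's loop; state = (balance, largest_expense_day, largest_expense, no_transaction_days)
def aStep (st : Int × Option String × Int × List String) (da : String × Int) :
    Int × Option String × Int × List String :=
  (st.1 + da.2,
   (if da.2 < st.2.2.1 then some da.1 else st.2.1),
   (if da.2 < st.2.2.1 then da.2 else st.2.2.1),
   (if da.2 == 0 then st.2.2.2 ++ [da.1] else st.2.2.2))

def analyze_transactions (transactions : List (String × Int)) : Int × Option String × List String :=
  let st := transactions.foldl aStep (0, none, 0, [])
  (st.1, st.2.1, st.2.2.2)

-- ===== PORT B =====
def analyze_transactions_alt (transactions : List (String × Int)) : Int × Option String × List String :=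
  let items := PySem.List.sorted transactions (fun kv => kv.2)
  let balance := (items.map Prod.snd).sum
  let no_transaction_days := (items.filter (fun p => p.2 == 0)).map Prod.fst
  let largest_expense_day :=
    match items with
    | (d, a) :: _ => if a < 0 then some d else none
    | [] => none
  (balance, largest_expense_day, no_transaction_days)

-- ===== PRECONDITION & SPEC =====
def Spec_analyze_transactions (transactions : List (String × Int)) (out : Int × Option String × List String) : Prop := out = analyze_transactions_alt transactions
instance (transactions : List (String × Int)) (out : Int × Option String × List String) : Decidable (Spec_analyze_transactions transactions out) := by unfold Spec_analyze_transactions; infer_instance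

-- ===== CLAIM (what is proved, stated in full; the proofs are below) =====
def Claim_equal_analyze_transactions : Prop := ∀ (transactions : List (String × Int)), Dom_analyze_transactions transactions → Spec_analyze_transactions transactions (analyze_transactions transactions)

-- ===== LEMMAS AND PROOFS =====

-- running-minimum step (the shape of PySem.List.min?'s fold with key = Prod.snd)
def bStep (m : Option (String × Int)) (x : String × Int) : Option (String × Int) :=
  match m with
  | none => some x
  | some p => if x.2 < p.2 then some x else some p

-- invariant relating A's (largest_expense, largest_expense_day) to the running minimum
def AInv (le : Int) (led : Option String) (m : Option (String × Int)) : Prop :=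
  (∃ d a, m = some (d, a) ∧ a < 0 ∧ le = a ∧ led = some d) ∨
  (le = 0 ∧ led = none ∧ ∀ d a, m = some (d, a) → 0 ≤ a)

lemma inv_step (le : Int) (led : Option String) (m : Option (String × Int))
    (d : String) (a : Int) (h : AInv le led m) :
    AInv (if a < le then a else le) (if a < le then some d else led) (bStep m (d, a)) := by
  rcases h with ⟨d', a', rfl, hneg, rfl, rfl⟩ | ⟨rfl, rfl, hpos⟩
  · simp only [bStep]
    by_cases hc : a < le
    · simp only [hc]
      exact Or.inl ⟨d, a, rfl, by omega, rfl, rfl⟩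
    · simp only [hc]
      exact Or.inl ⟨d', le, rfl, hneg, rfl, rfl⟩
  · cases m with
    | none =>
      simp only [bStep]
      by_cases hc : a < 0
      · simp only [if_pos hc]
        exact Or.inl ⟨d, a, rfl, hc, rfl, rfl⟩
      · simp only [if_neg hc]
        exact Or.inr ⟨rfl, rfl, fun d' a' h' => by cases h'; omega⟩
    | some p =>
      have hp : 0 ≤ p.2 := hpos p.1 p.2 rfl
      simp only [bStep]
      by_cases hc : a < 0
      · have hc' : a < p.2 := by omega
        simp only [if_pos hc, if_pos hc']
        exact Or.inl ⟨d, a, rfl, hc, rfl, rfl⟩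
      · simp only [if_neg hc]
        split_ifs
        · exact Or.inr ⟨rfl, rfl, fun d' a' h' => by cases h'; omega⟩
        · exact Or.inr ⟨rfl, rfl, fun d' a' h' => by cases h'; omega⟩

-- characterisation of A's fold: balance = sum, zeros = filter, and AInv against the min-fold
lemma fold_spec (l : List (String × Int)) :
    ∀ (b le : Int) (led : Option String) (ntd : List String) (m : Option (String × Int)),
    AInv le led m →
    (List.foldl aStep (b, led, le, ntd) l).1 = b + (l.map Prod.snd).sum ∧
    (List.foldl aStep (b, led, le, ntd) l).2.2.2
        = ntd ++ (l.filter (fun p => p.2 == 0)).map Prod.fst ∧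
    AInv (List.foldl aStep (b, led, le, ntd) l).2.2.1
        (List.foldl aStep (b, led, le, ntd) l).2.1
        (List.foldl bStep m l) := by
  induction l with
  | nil => intro b le led ntd m h; simpa using h
  | cons x t ih =>
    intro b le led ntd m h
    obtain ⟨d, a⟩ := x
    have hstep : aStep (b, led, le, ntd) (d, a)
        = (b + a, (if a < le then some d else led), (if a < le then a else le),
           (if a == 0 then ntd ++ [d] else ntd)) := rfl
    simp only [List.foldl_cons, hstep]
    obtain ⟨h1, h2, h3⟩ := ih (b + a) (if a < le then a else le) (if a < le then some d else led)
      (if a == 0 then ntd ++ [d] else ntd) (bStep m (d, a)) (inv_step le led m d a h)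
    refine ⟨?_, ?_, ?_⟩
    · rw [h1]; simp; ring
    · rw [h2]
      by_cases hz : a = 0
      · simp [hz]
      · simp [hz]
    · exact h3

-- sorting one more element = inserting it into the sorted prefix
lemma sorted_append_one (xs : List (String × Int)) (x : String × Int) :
    PySem.List.sorted (xs ++ [x]) (fun kv => kv.2)
      = PySem.List.insertBy (fun a b => decide (a.2 < b.2)) x
          (PySem.List.sorted xs (fun kv => kv.2)) := by
  rw [PySem.List.sorted_eq_foldl_insertBy, PySem.List.sorted_eq_foldl_insertBy,
      List.foldl_append]
  rfl

-- stability at one amount value c: inserting x into an ordered list puts it after all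
-- earlier elements of amount c (if x.2 = c) and does not disturb their order
lemma filter_insertBy (c : Int) (x : String × Int) (l : List (String × Int))
    (hl : l.Pairwise (fun a b => a.2 ≤ b.2)) :
    (PySem.List.insertBy (fun a b => decide (a.2 < b.2)) x l).filter (fun p => p.2 == c)
      = l.filter (fun p => p.2 == c) ++ (if x.2 == c then [x] else []) := by
  induction l with
  | nil => simp [PySem.List.insertBy]; split_ifs <;> simp_all
  | cons y ys ih =>
    have hy : ∀ a ∈ ys, y.2 ≤ a.2 := fun a ha => (List.pairwise_cons.1 hl).1 a ha
    have hys : ys.Pairwise (fun a b => a.2 ≤ b.2) := (List.pairwise_cons.1 hl).2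
    simp only [PySem.List.insertBy]
    by_cases hb : x.2 < y.2
    · simp only [hb, decide_true, if_true]
      by_cases hc : x.2 = c
      · -- x.2 = c < y.2 ≤ every later amount: nothing after x has amount c
        have hnone : (y :: ys).filter (fun p => p.2 == c) = [] := by
          rw [List.filter_eq_nil_iff]
          intro a ha
          rcases List.mem_cons.1 ha with rfl | ha
          · simp; omega
          · have := hy a ha; simp; omega
        simp [hc, hnone]
      · simp [List.filter_cons, hc]
    · simp only [hb, decide_false]
      by_cases hyc : y.2 = c
      · simp [hyc, ih hys]
      · simp [hyc, ih hys]

-- stability corollary: filtering one amount value commutes with the sort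
lemma filter_sorted (c : Int) (xs : List (String × Int)) :
    (PySem.List.sorted xs (fun kv => kv.2)).filter (fun p => p.2 == c)
      = xs.filter (fun p => p.2 == c) := by
  induction xs using List.reverseRecOn with
  | nil => rfl
  | append_singleton xs x ih =>
    rw [sorted_append_one, filter_insertBy c x _ (PySem.List.sorted_pairwise xs _),
        ih, List.filter_append]
    by_cases hc : x.2 = c <;> simp [hc]

-- the head of the stable sort is the first occurrence of the minimal amount,
-- i.e. exactly the running-minimum fold's result
lemma head_sorted_eq_min_fold (xs : List (String × Int)) :
    (PySem.List.sorted xs (fun kv => kv.2)).head? = xs.foldl bStep none := by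
  induction xs using List.reverseRecOn with
  | nil => rfl
  | append_singleton xs x ih =>
    rw [sorted_append_one, List.foldl_append, List.foldl_cons, List.foldl_nil, ← ih]
    cases hs : PySem.List.sorted xs (fun kv => kv.2) with
    | nil => rfl
    | cons y ys =>
      simp only [PySem.List.insertBy, List.head?_cons, bStep]
      by_cases hb : x.2 < y.2
      · simp [hb]
      · simp [hb]

-- ===== VERDICT (by name: the statement is the Claim_ definition above) =====
theorem analyze_transactions_spec : Claim_equal_analyze_transactions := by
  intro ts _
  unfold Spec_analyze_transactions analyze_transactions analyze_transactions_alt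
  obtain ⟨h1, h2, h3⟩ := fold_spec ts 0 0 none [] none
    (Or.inr ⟨rfl, rfl, fun d a h => by cases h⟩)
  refine Prod.ext ?_ (Prod.ext ?_ ?_)
  · rw [h1]
    have hperm : (PySem.List.sorted ts (fun kv => kv.2)).Perm ts :=
      PySem.List.sorted_perm ts _ false
    simpa using ((hperm.map Prod.snd).sum_eq).symm
  · rw [← head_sorted_eq_min_fold] at h3
    cases hs : PySem.List.sorted ts (fun kv => kv.2) with
    | nil =>
      rw [hs] at h3
      rcases h3 with ⟨d, a, hm, _⟩ | ⟨_, hled, _⟩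
      · cases hm
      · simp [hled]
    | cons p t =>
      rw [hs] at h3
      obtain ⟨d, a⟩ := p
      rcases h3 with ⟨d', a', hm, hneg, _, hled⟩ | ⟨_, hled, hpos⟩
      · simp only [List.head?_cons, Option.some.injEq] at hm
        cases hm
        simp [hled, if_pos hneg]
      · have := hpos d a rfl
        simp [hled, show ¬ a < 0 by omega]
  · rw [h2]
    simp [filter_sorted 0 ts]
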